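-- pv_equiv track=rewrite | github.com/showell/angry-gopher | games/lynrummy/python/beginner.py | yank
-- ===== SOURCE A (Python) =====
-- RANKS = "A23456789TJQK"
--
-- SUITS = "CDSH"           # Clubs Diamonds Spades Hearts
--
-- def label(c):
--     v, s, _ = c
--     return RANKS[v - 1] + SUITS[s]
--
-- def _find(board, c):
--     for si, stack in enumerate(board):
--         for ci, x in enumerate(stack):
--             if x == c:
--                 return si, ci
--     raise ValueError(f"{label(c)} not on board")
--
-- def yank(board, c):
--     """Same split mechanic as pluck, but the call site has
--     decided one half is a short partial (singleton or
--     2-partial). The cost is paid by the caller via taboo +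
--     follow-up plans."""
--     si, ci = _find(board, c)
--     stack = board[si]
--     new = [s[:] for i, s in enumerate(board) if i != si]
--     new.append(stack[:ci])
--     new.append([c])
--     new.append(stack[ci + 1:])
--     return new
-- ===== SOURCE B (Python) =====
-- RANKS = "A23456789TJQK"
--
-- SUITS = "CDSH"           # Clubs Diamonds Spades Hearts
--
-- def label(c):
--     v, s, _ = c
--     return RANKS[v - 1] + SUITS[s]
--
-- def yank(board, c):
--     """Structural recursion on the board: if the head stack holds c, split it
--     there and put the remaining stacks (copied) before the three split pieces;
--     otherwise keep a copy of the head and recurse on the tail."""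
--     if not board:
--         raise ValueError(f"{label(c)} not on board")
--     head, rest = board[0], board[1:]
--     if c in head:
--         ci = head.index(c)
--         return [s[:] for s in rest] + [head[:ci], [c], head[ci + 1:]]
--     return [head[:]] + yank(rest, c)
-- ===== Notes on version B (the rewrite author's own statement) =====
-- stated objective: alternative
-- what changed: A runs a separate index-based find pass (_find returning (si, ci)) and then a rebuild pass filtering out index si; B is a structural recursion on the board with no indices over stacks at all: the first stack containing c is split on the spot and the recursion prepends each non-matching head copy, which puts the split pieces at the end.
import Mathlib
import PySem

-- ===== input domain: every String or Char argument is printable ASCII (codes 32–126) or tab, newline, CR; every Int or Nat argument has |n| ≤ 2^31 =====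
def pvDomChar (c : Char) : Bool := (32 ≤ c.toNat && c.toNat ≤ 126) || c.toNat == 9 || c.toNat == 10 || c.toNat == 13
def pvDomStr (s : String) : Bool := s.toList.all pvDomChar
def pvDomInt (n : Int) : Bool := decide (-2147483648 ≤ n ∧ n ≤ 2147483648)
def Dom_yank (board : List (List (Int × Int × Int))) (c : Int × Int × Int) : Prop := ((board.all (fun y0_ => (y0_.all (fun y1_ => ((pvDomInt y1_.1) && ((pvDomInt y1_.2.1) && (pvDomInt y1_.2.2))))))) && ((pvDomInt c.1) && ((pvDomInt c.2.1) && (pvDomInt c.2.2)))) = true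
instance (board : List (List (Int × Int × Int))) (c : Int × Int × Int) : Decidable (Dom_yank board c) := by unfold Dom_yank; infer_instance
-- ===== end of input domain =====

-- B replaces A's index-based find-then-rebuild (two passes over board) with a structural
-- recursion on the board that splits the first matching stack in place (objective: alternative).
-- On inputs where c is not on the board the Python A raises ValueError; Pre_yank excludes exactly those.

-- ===== PORT A =====
-- inner loop of _find: 'for ci, x in enumerate(stack): if x == c: return ci'
def innerFindA (stack : List (Int × Int × Int)) (c : Int × Int × Int) (ci : Nat) : Option Nat :=
  match stack with
  | [] => none
  | x :: xs => if x = c then some ci else innerFindA xs c (ci + 1)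

-- outer loop of _find over 'enumerate(board)'
def findA (board : List (List (Int × Int × Int))) (c : Int × Int × Int) (si : Nat) : Option (Nat × Nat) :=
  match board with
  | [] => none
  | stack :: rest =>
    match innerFindA stack c 0 with
    | some ci => some (si, ci)
    | none => findA rest c (si + 1)

-- '[s[:] for i, s in enumerate(board) if i != si]'  (s[:] copies, identity on immutable Lean lists)
def buildNewA (board : List (List (Int × Int × Int))) (i si : Nat) : List (List (Int × Int × Int)) :=
  match board with
  | [] => []
  | s :: rest => if i ≠ si then s :: buildNewA rest (i + 1) si else buildNewA rest (i + 1) si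

def yank (board : List (List (Int × Int × Int))) (c : Int × Int × Int) : List (List (Int × Int × Int)) :=
  match findA board c 0 with
  | none => []  -- Python raises ValueError here; excluded by Pre_yank
  | some (si, ci) =>
    let stack := (PySem.List.pyGet? board (si : Int)).getD []
    let new := buildNewA board 0 si
    new ++ [PySem.List.slice stack none (some (ci : Int)), [c],
            PySem.List.slice stack (some ((ci : Int) + 1)) none]

-- ===== PORT B =====
-- structural recursion of Source B ('s[:]' copies are identity on immutable Lean lists)
def yank_alt (board : List (List (Int × Int × Int))) (c : Int × Int × Int) : List (List (Int × Int × Int)) :=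
  match board with
  | [] => []  -- Python raises ValueError here; excluded by Pre_yank
  | head :: rest =>
    if c ∈ head then
      let ci := (PySem.List.index? head c).getD 0
      rest ++ [PySem.List.slice head none (some (ci : Int)), [c],
               PySem.List.slice head (some ((ci : Int) + 1)) none]
    else
      head :: yank_alt rest c

-- ===== PRECONDITION & SPEC =====
-- exactly the inputs on which Python A returns (it raises iff c occurs in no stack)
def Pre_yank (board : List (List (Int × Int × Int))) (c : Int × Int × Int) : Prop :=
  ∃ s ∈ board, c ∈ s
instance (board : List (List (Int × Int × Int))) (c : Int × Int × Int) : Decidable (Pre_yank board c) := by unfold Pre_yank; infer_instance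
def pvWitness_yank : (List (List (Int × Int × Int))) × (Int × Int × Int) := ([[(1, 0, 0)], [(2, 1, 0)]], (2, 1, 0))

def Spec_yank (board : List (List (Int × Int × Int))) (c : Int × Int × Int) (out : List (List (Int × Int × Int))) : Prop := out = yank_alt board c
instance (board : List (List (Int × Int × Int))) (c : Int × Int × Int) (out : List (List (Int × Int × Int))) : Decidable (Spec_yank board c out) := by unfold Spec_yank; infer_instance

-- ===== CLAIM (what is proved, stated in full; the proofs are below) =====
def Claim_equal_yank : Prop := ∀ (board : List (List (Int × Int × Int))) (c : Int × Int × Int), Dom_yank board c → Pre_yank board c → Spec_yank board c (yank board c)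

-- ===== LEMMAS AND PROOFS =====

-- the three split pieces A appends, as a function of board, si, ci
def piecesA (board : List (List (Int × Int × Int))) (c : Int × Int × Int) (si ci : Nat) : List (List (Int × Int × Int)) :=
  let stack := (PySem.List.pyGet? board (si : Int)).getD []
  [PySem.List.slice stack none (some (ci : Int)), [c],
   PySem.List.slice stack (some ((ci : Int) + 1)) none]

lemma innerFindA_eq (stack : List (Int × Int × Int)) (c : Int × Int × Int) (k : Nat) :
    innerFindA stack c k = (PySem.List.index? stack c).map (· + k) := by
  induction stack generalizing k with
  | nil => simp [innerFindA, PySem.List.index?]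
  | cons x xs ih =>
    by_cases hx : x = c
    · subst hx
      rw [PySem.List.index?_cons_self]
      simp [innerFindA]
    · rw [PySem.List.index?_cons_of_ne xs hx]
      simp only [innerFindA, if_neg hx, ih, Option.map_map]
      cases PySem.List.index? xs c with
      | none => rfl
      | some v => simp [Nat.add_comm 1 k]

lemma innerFindA_none (stack : List (Int × Int × Int)) (c : Int × Int × Int) :
    innerFindA stack c 0 = none ↔ c ∉ stack := by
  rw [innerFindA_eq, ← PySem.List.index?_eq_none_iff stack c]
  cases PySem.List.index? stack c <;> simp

lemma findA_succ (board : List (List (Int × Int × Int))) (c : Int × Int × Int) (k : Nat) :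
    findA board c (k + 1) = (findA board c k).map (fun p => (p.1 + 1, p.2)) := by
  induction board generalizing k with
  | nil => simp [findA]
  | cons stack rest ih =>
    cases h : innerFindA stack c 0 with
    | some ci => simp [findA, h]
    | none => simp [findA, h, ih]

lemma buildNewA_gt (board : List (List (Int × Int × Int))) (i si : Nat) (h : si < i) :
    buildNewA board i si = board := by
  induction board generalizing i with
  | nil => rfl
  | cons s rest ih => simp [buildNewA, Nat.ne_of_gt h, ih (i + 1) (Nat.lt_succ_of_lt h)]

lemma buildNewA_shift (board : List (List (Int × Int × Int))) (i si : Nat) :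
    buildNewA board (i + 1) (si + 1) = buildNewA board i si := by
  induction board generalizing i with
  | nil => rfl
  | cons s rest ih =>
    by_cases h : i = si <;> simp [buildNewA, h, ih]

lemma findA_none_iff (board : List (List (Int × Int × Int))) (c : Int × Int × Int) (k : Nat) :
    findA board c k = none ↔ ∀ s ∈ board, c ∉ s := by
  induction board generalizing k with
  | nil => simp [findA]
  | cons stack rest ih =>
    cases h : innerFindA stack c 0 with
    | some ci =>
      have : c ∈ stack := by
        by_contra hc
        rw [(innerFindA_none stack c).mpr hc] at h; cases h
      simp [findA, h, this]
    | none =>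
      have hc := (innerFindA_none stack c).mp h
      simp [findA, h, ih, hc]

-- the heart: B's structural recursion computes A's find-then-rebuild result (on Pre_)
lemma yank_alt_eq_findA (c : Int × Int × Int) (board : List (List (Int × Int × Int)))
    (hpre : ∃ s ∈ board, c ∈ s) :
    yank_alt board c
    = match findA board c 0 with
      | none => []
      | some (si, ci) => buildNewA board 0 si ++ piecesA board c si ci := by
  induction board with
  | nil => exact absurd hpre (by simp)
  | cons stack rest ih =>
    by_cases hc : c ∈ stack
    · obtain ⟨j, hj⟩ : ∃ j, PySem.List.index? stack c = some j := by
        rw [← Option.isSome_iff_exists]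
        exact (PySem.List.index?_isSome_iff stack c).mpr hc
      have hinner : innerFindA stack c 0 = some j := by rw [innerFindA_eq, hj]; rfl
      have hb : buildNewA (stack :: rest) 0 0 = rest := by
        simp [buildNewA, buildNewA_gt rest 1 0 Nat.zero_lt_one]
      rw [yank_alt, if_pos hc, hj]
      simp only [Option.getD_some, findA, hinner, hb, piecesA]
      simp
    · have hinner : innerFindA stack c 0 = none := (innerFindA_none stack c).mpr hc
      have hpre' : ∃ s ∈ rest, c ∈ s := by
        obtain ⟨s, hs, hcs⟩ := hpre
        rcases List.mem_cons.mp hs with h | h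
        · exact absurd (h ▸ hcs) hc
        · exact ⟨s, h, hcs⟩
      rw [yank_alt, if_neg hc, ih hpre']
      simp only [findA, hinner]
      rw [findA_succ rest c 0]
      cases h : findA rest c 0 with
      | none => exact absurd ((findA_none_iff rest c 0).mp h) (by simpa using hpre')
      | some p =>
        obtain ⟨si, ci⟩ := p
        have hb : buildNewA (stack :: rest) 0 (si + 1) = stack :: buildNewA rest 0 si := by
          simp [buildNewA, buildNewA_shift]
        have hp : piecesA (stack :: rest) c (si + 1) ci = piecesA rest c si ci := by
          simp [piecesA, PySem.List.pyGet?_natCast]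
        simp [hb, hp]

-- ===== VERDICT (by name: the statement is the Claim_ definition above) =====
theorem yank_spec : Claim_equal_yank := by
  intro board c _ hpre
  show yank board c = yank_alt board c
  rw [yank_alt_eq_findA c board hpre]
  unfold yank
  cases findA board c 0 with
  | none => simp
  | some p =>
    obtain ⟨si, ci⟩ := p
    simp [piecesA]
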